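-- pv_equiv track=rewrite | github.com/brian224code/phoneme-bridges | udpos/hindi-urdu-roman.py | convert_with_romanization
-- ===== SOURCE A (Python) =====
-- def convert_with_romanization(sentences, romanizations, pos_tags):
--     new_data = []
--     new_tags = []
--
--     for sentence, romanization, tags in zip(
--         sentences, romanizations, pos_tags
--     ):
--         new_text = []
--         new_entities = []
--         start = 0
--
--         sentence = sentence.split()
--         romanization = romanization.split()
--         tags = tags.split()
--
--         for word, tag in zip(sentence, tags):
--             new_text.append(word)
--             end = start + len(word)
--             new_entities.append((start, end, tag, 1))
--             start = end + 1
--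
--         for word, tag in zip(romanization, tags):
--             new_text.append(word)
--             end = start + len(word)
--             new_entities.append((start, end, tag, 0))
--             start = end + 1
--
--         new_tags.append(new_entities)
--         new_text_str = " ".join(new_text)
--         new_data.append(new_text_str)
--
--     return new_data, new_tags
-- ===== SOURCE B (Python) =====
-- def convert_with_romanization(sentences, romanizations, pos_tags):
--     new_data = []
--     new_tags = []
--
--     for sentence, romanization, tags in zip(sentences, romanizations, pos_tags):
--         s_words = sentence.split()
--         r_words = romanization.split()
--         t = tags.split()
--
--         # one ordered token list: sentence words (flag 1) then romanization
--         # words (flag 0), each phase independently zip-truncated by the tags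
--         tokens = [(w, tag, 1) for w, tag in zip(s_words, t)] + \
--                  [(w, tag, 0) for w, tag in zip(r_words, t)]
--
--         new_data.append(" ".join(w for w, _, _ in tokens))
--
--         # second pass: cumulative start-offset array (token length + 1 space)
--         starts = [0]
--         for w, _, _ in tokens:
--             starts.append(starts[-1] + len(w) + 1)
--
--         new_tags.append([(st, st + len(w), tag, f)
--                          for (w, tag, f), st in zip(tokens, starts)])
--
--     return new_data, new_tags
-- ===== Notes on version B (the rewrite author's own statement) =====
-- stated objective: alternative
-- what changed: B builds each sentence's combined token list (word, tag, flag) first, joins it once into the text, and computes spans in a separate second pass by zipping tokens against a cumulative start-offset array, instead of A's single loop threading a mutable start counter while appending text and spans together.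
import Mathlib
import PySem

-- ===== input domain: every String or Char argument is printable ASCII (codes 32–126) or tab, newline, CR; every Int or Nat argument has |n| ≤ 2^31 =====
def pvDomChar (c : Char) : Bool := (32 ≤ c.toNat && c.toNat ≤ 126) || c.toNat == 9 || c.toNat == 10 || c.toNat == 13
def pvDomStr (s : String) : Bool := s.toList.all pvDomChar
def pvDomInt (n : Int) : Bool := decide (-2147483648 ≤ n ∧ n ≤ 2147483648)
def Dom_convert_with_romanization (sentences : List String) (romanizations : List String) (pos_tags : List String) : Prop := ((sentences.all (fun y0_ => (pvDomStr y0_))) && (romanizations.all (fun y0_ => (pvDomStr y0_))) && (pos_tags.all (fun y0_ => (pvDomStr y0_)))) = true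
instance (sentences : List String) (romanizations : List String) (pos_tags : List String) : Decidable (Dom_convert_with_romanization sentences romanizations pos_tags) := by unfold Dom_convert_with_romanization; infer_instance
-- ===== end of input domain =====

-- B builds each sentence's token list first, joins it once, and derives spans in a
-- separate pass from a cumulative start-offset array (objective: alternative decomposition).


-- ===== PORT A =====
def convert_with_romanization (sentences : List String) (romanizations : List String) (pos_tags : List String) : List String × (List (List (Int × Int × String × Int))) :=
  (sentences.zip (romanizations.zip pos_tags)).foldl (fun acc trip =>
    let sentence := PySem.Str.split₀ trip.1
    let romanization := PySem.Str.split₀ trip.2.1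
    let tags := PySem.Str.split₀ trip.2.2
    let st1 := (sentence.zip tags).foldl (fun st wt =>
        let e := st.2.2 + PySem.Str.len wt.1
        (st.1 ++ [wt.1], st.2.1 ++ [(st.2.2, e, wt.2, (1 : Int))], e + 1))
      (([] : List String), ([] : List (Int × Int × String × Int)), (0 : Int))
    let st2 := (romanization.zip tags).foldl (fun st wt =>
        let e := st.2.2 + PySem.Str.len wt.1
        (st.1 ++ [wt.1], st.2.1 ++ [(st.2.2, e, wt.2, (0 : Int))], e + 1)) st1
    (acc.1 ++ [PySem.Str.join " " st2.1], acc.2 ++ [st2.2.1]))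
    (([] : List String), ([] : List (List (Int × Int × String × Int))))

-- ===== PORT B =====
def convert_with_romanization_alt (sentences : List String) (romanizations : List String) (pos_tags : List String) : List String × (List (List (Int × Int × String × Int))) :=
  (sentences.zip (romanizations.zip pos_tags)).foldl (fun acc trip =>
    let sWords := PySem.Str.split₀ trip.1
    let rWords := PySem.Str.split₀ trip.2.1
    let t := PySem.Str.split₀ trip.2.2
    let tokens := (sWords.zip t).map (fun wt => (wt.1, wt.2, (1 : Int)))
               ++ (rWords.zip t).map (fun wt => (wt.1, wt.2, (0 : Int)))
    let text := PySem.Str.join " " (tokens.map (fun tok => tok.1))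
    -- starts[-1]: the accumulator list is never empty, so .getD 0 is never used (exact)
    let starts := tokens.foldl (fun st tok =>
        st ++ [((PySem.List.pyGet? st (-1)).getD 0) + PySem.Str.len tok.1 + 1]) [(0 : Int)]
    let spansL := (tokens.zip starts).map (fun ts =>
        (ts.2, ts.2 + PySem.Str.len ts.1.1, ts.1.2.1, ts.1.2.2))
    (acc.1 ++ [text], acc.2 ++ [spansL]))
    (([] : List String), ([] : List (List (Int × Int × String × Int))))

-- ===== PRECONDITION & SPEC =====
def Spec_convert_with_romanization (sentences : List String) (romanizations : List String) (pos_tags : List String) (out : List String × (List (List (Int × Int × String × Int)))) : Prop := out = convert_with_romanization_alt sentences romanizations pos_tags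
instance (sentences : List String) (romanizations : List String) (pos_tags : List String) (out : List String × (List (List (Int × Int × String × Int)))) : Decidable (Spec_convert_with_romanization sentences romanizations pos_tags out) := by unfold Spec_convert_with_romanization; infer_instance

-- ===== CLAIM (what is proved, stated in full; the proofs are below) =====
def Claim_equal_convert_with_romanization : Prop := ∀ (sentences : List String) (romanizations : List String) (pos_tags : List String), Dom_convert_with_romanization sentences romanizations pos_tags → Spec_convert_with_romanization sentences romanizations pos_tags (convert_with_romanization sentences romanizations pos_tags)

-- ===== LEMMAS AND PROOFS =====

/-- Proof-side: the span list produced sequentially from a token list and a start offset. -/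
def pvSpans : List (String × String × Int) → Int → List (Int × Int × String × Int)
  | [], _ => []
  | tok :: rest, s => (s, s + PySem.Str.len tok.1, tok.2.1, tok.2.2) :: pvSpans rest (s + PySem.Str.len tok.1 + 1)

/-- Proof-side: the offset after consuming a token list. -/
def pvEnd : List (String × String × Int) → Int → Int
  | [], s => s
  | tok :: rest, s => pvEnd rest (s + PySem.Str.len tok.1 + 1)

/-- Proof-side: the cumulative start array (one extra trailing entry). -/
def pvStarts : List (String × String × Int) → Int → List Int
  | [], s => [s]
  | tok :: rest, s => s :: pvStarts rest (s + PySem.Str.len tok.1 + 1)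

theorem phaseA (flag : Int) (pairs : List (String × String)) :
    ∀ (text : List String) (ents : List (Int × Int × String × Int)) (s : Int),
    pairs.foldl (fun st wt =>
        let e := st.2.2 + PySem.Str.len wt.1
        (st.1 ++ [wt.1], st.2.1 ++ [(st.2.2, e, wt.2, flag)], e + 1)) (text, ents, s)
      = (text ++ pairs.map Prod.fst,
         ents ++ pvSpans (pairs.map (fun p => (p.1, p.2, flag))) s,
         pvEnd (pairs.map (fun p => (p.1, p.2, flag))) s) := by
  induction pairs with
  | nil => intro text ents s; simp [pvSpans, pvEnd]
  | cons p rest ih =>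
    intro text ents s
    simp only [List.foldl_cons, List.map_cons, pvSpans, pvEnd, ih]
    simp

theorem pvSpans_append (t1 t2 : List (String × String × Int)) :
    ∀ s, pvSpans (t1 ++ t2) s = pvSpans t1 s ++ pvSpans t2 (pvEnd t1 s) := by
  induction t1 with
  | nil => intro s; simp [pvSpans, pvEnd]
  | cons tok rest ih => intro s; simp [pvSpans, pvEnd, ih]

theorem starts_fold (tokens : List (String × String × Int)) :
    ∀ (pre : List Int) (s : Int),
    tokens.foldl (fun st tok =>
        st ++ [((PySem.List.pyGet? st (-1)).getD 0) + PySem.Str.len tok.1 + 1]) (pre ++ [s])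
      = pre ++ pvStarts tokens s := by
  induction tokens with
  | nil => intro pre s; simp [pvStarts]
  | cons tok rest ih =>
    intro pre s
    simp only [List.foldl_cons, PySem.List.pyGet?_neg_one_append_singleton, Option.getD_some]
    have h := ih (pre ++ [s]) (s + PySem.Str.len tok.1 + 1)
    simp only [List.append_assoc] at h ⊢
    rw [h]
    simp [pvStarts]

theorem zip_starts (tokens : List (String × String × Int)) :
    ∀ s, (tokens.zip (pvStarts tokens s)).map (fun ts =>
        (ts.2, ts.2 + PySem.Str.len ts.1.1, ts.1.2.1, ts.1.2.2)) = pvSpans tokens s := by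
  induction tokens with
  | nil => intro s; simp [pvSpans]
  | cons tok rest ih =>
    intro s
    simp only [pvStarts, pvSpans, List.zip_cons_cons, List.map_cons]
    rw [ih]

-- ===== VERDICT (by name: the statement is the Claim_ definition above) =====
theorem convert_with_romanization_spec : Claim_equal_convert_with_romanization := by
  intro sentences romanizations pos_tags _
  unfold Spec_convert_with_romanization convert_with_romanization convert_with_romanization_alt
  congr 1
  funext acc trip
  simp only [phaseA, List.nil_append]
  have hs := starts_fold
    ((((PySem.Str.split₀ trip.1).zip (PySem.Str.split₀ trip.2.2)).map (fun wt => (wt.1, wt.2, (1 : Int))))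
      ++ (((PySem.Str.split₀ trip.2.1).zip (PySem.Str.split₀ trip.2.2)).map (fun wt => (wt.1, wt.2, (0 : Int)))))
    [] 0
  simp only [List.nil_append] at hs
  rw [hs, zip_starts, pvSpans_append]
  simp [List.map_map, Function.comp_def]
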